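-- pv_equiv track=rewrite | github.com/lsmman/All-about-Algorithms | book_study_이코테/구현_시각.py | solve_efficient
-- ===== SOURCE A (Python) =====
-- def solve_efficient(N):
--     cnt = 0
--     cnt_include_3 = 3600
--     cnt_not_include_3 = 1575
--
--     for n in range(N + 1):
--         if "3" in str(n):
--             cnt += cnt_include_3
--         else:
--             cnt += cnt_not_include_3
--     return cnt
-- ===== SOURCE B (Python) =====
-- def _no3(m):
--     # True iff the decimal digits of m (m >= 0) contain no digit 3
--     while m > 9:
--         if m % 10 == 3:
--             return False
--         m //= 10
--     return m != 3
--
--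
-- def _count_no3(m):
--     # number of integers in [0, m] whose decimal digits contain no 3 (0 if m < 0)
--     if m < 0:
--         return 0
--     q, r = divmod(m, 10)
--     last = r + 1 - (1 if r >= 3 else 0)
--     return 9 * _count_no3(q - 1) + (last if _no3(q) else 0)
--
--
-- def solve_efficient(N):
--     if N < 0:
--         return 0
--     no3 = _count_no3(N)
--     return 3600 * (N + 1 - no3) + 1575 * no3
-- ===== Notes on version B (the rewrite author's own statement) =====
-- stated objective: faster
-- what changed: Replaced A's per-hour loop over range(N+1) with string digit tests by a digit-by-digit recursive count of integers in [0,N] containing no digit 3 (O(log^2 N) arithmetic), then one closed-form weighted sum.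
import Mathlib
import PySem

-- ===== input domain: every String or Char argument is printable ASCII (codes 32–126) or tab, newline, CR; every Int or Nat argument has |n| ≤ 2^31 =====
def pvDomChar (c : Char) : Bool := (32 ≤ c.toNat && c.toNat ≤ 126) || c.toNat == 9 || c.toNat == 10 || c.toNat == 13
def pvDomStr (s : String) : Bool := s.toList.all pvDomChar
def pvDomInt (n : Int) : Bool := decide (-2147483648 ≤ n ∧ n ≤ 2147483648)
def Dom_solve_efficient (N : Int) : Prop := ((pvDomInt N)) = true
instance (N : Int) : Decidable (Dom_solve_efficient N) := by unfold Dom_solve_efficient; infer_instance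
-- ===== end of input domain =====

-- B replaces A's per-hour scan (string test for digit '3' on every n ≤ N) by a digit-DP count of
-- the integers in [0,N] without a digit 3, then one weighted closed-form sum (objective: faster).

-- ===== PORT A =====
def solve_efficient (N : Int) : Int :=
  let cnt : Int := 0
  let cnt_include_3 : Int := 3600
  let cnt_not_include_3 : Int := 1575
  (PySem.List.pyRange 0 (N + 1) 1).foldl
    (fun cnt n =>
      if PySem.Str.isIn "3" (PySem.Int.toStr n) then cnt + cnt_include_3
      else cnt + cnt_not_include_3) cnt

-- ===== PORT B =====
-- helper _no3(m): no digit of m (m ≥ 0) is 3; the Python while-loop becomes recursion on m.toNat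
def pvNo3 (m : Int) : Bool :=
  if _h : 9 < m then
    if PySem.Int.mod m 10 == 3 then false
    else pvNo3 (PySem.Int.floordiv m 10)
  else m != 3
termination_by m.toNat
decreasing_by
  simp only [PySem.Int.floordiv, Int.fdiv_eq_ediv]
  omega

-- helper _count_no3(m): number of integers in [0,m] with no digit 3 (0 if m < 0)
def pvCountNo3 (m : Int) : Int :=
  if _h : m < 0 then 0
  else
    let q := PySem.Int.floordiv m 10
    let r := PySem.Int.mod m 10
    let last := r + 1 - (if 3 ≤ r then 1 else 0)
    9 * pvCountNo3 (q - 1) + (if pvNo3 q then last else 0)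
termination_by (m + 1).toNat
decreasing_by
  simp only [PySem.Int.floordiv, Int.fdiv_eq_ediv]
  omega

def solve_efficient_alt (N : Int) : Int :=
  if N < 0 then 0
  else
    let no3 := pvCountNo3 N
    3600 * (N + 1 - no3) + 1575 * no3

-- ===== PRECONDITION & SPEC =====
def Spec_solve_efficient (N : Int) (out : Int) : Prop := out = solve_efficient_alt N
instance (N : Int) (out : Int) : Decidable (Spec_solve_efficient N out) := by unfold Spec_solve_efficient; infer_instance

-- ===== CLAIM (what is proved, stated in full; the proofs are below) =====
def Claim_equal_solve_efficient : Prop := ∀ (N : Int), Dom_solve_efficient N → Spec_solve_efficient N (solve_efficient N)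

-- ===== LEMMAS AND PROOFS =====

theorem pvFd10 (a : Int) : PySem.Int.floordiv a 10 = a / 10 := by
  simp [PySem.Int.floordiv, Int.fdiv_eq_ediv]

theorem pvFm10 (a : Int) : PySem.Int.mod a 10 = a % 10 := by
  simp [PySem.Int.mod, Int.fmod_eq_emod]

theorem pvNo3_zero : pvNo3 0 = true := by
  rw [pvNo3]; norm_num

-- uniform one-digit unfolding of pvNo3 on nonnegative input
theorem pvNo3_step (k : Int) (hk : 0 ≤ k) :
    pvNo3 k = (!(k % 10 == 3) && pvNo3 (k / 10)) := by
  rw [pvNo3, pvFm10, pvFd10]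
  by_cases h : 9 < k
  · rw [dif_pos h]
    by_cases h3 : k % 10 = 3
    · simp [h3]
    · simp [beq_iff_eq, h3]
  · have hq : k / 10 = 0 := by omega
    have hm : k % 10 = k := by omega
    rw [dif_neg h, hq, hm, pvNo3_zero, Bool.and_true]
    rfl

theorem pvDigitChar3 : ∀ d : Nat, d < 10 → (Nat.digitChar d = '3' ↔ d = 3) := by decide

-- the string test "3" in str(n) agrees with the arithmetic digit test (Nat level)
theorem pvMem_toDigits (k : Nat) : '3' ∈ Nat.toDigits 10 k ↔ pvNo3 (k : Int) = false := by
  induction k using Nat.strong_induction_on with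
  | _ k ih =>
    have hstep := pvNo3_step (k : Int) (by positivity)
    have hdiv : ((k : Int)) / 10 = ((k / 10 : Nat) : Int) := by omega
    have hlt : k % 10 < 10 := by omega
    by_cases hk : k < 10
    · have hchar : ('3' = k.digitChar) ↔ (k = 3) := by
        rw [eq_comm]; exact pvDigitChar3 k hk
      have hm10 : ((k : Int)) % 10 = (k : Int) := by omega
      have hd10 : ((k : Int)) / 10 = 0 := by omega
      rw [Nat.toDigits_of_lt_base hk, List.mem_singleton, hstep, hchar, hm10, hd10,
        pvNo3_zero, Bool.and_true]
      constructor
      · rintro rfl; simp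
      · intro h
        have h3 : ((k : Int)) = 3 := by simpa [beq_iff_eq] using h
        exact_mod_cast h3
    · have hmod : ((k : Int)) % 10 = ((k % 10 : Nat) : Int) := by omega
      have hchar : ('3' = (k % 10).digitChar) ↔ (k % 10 = 3) := by
        rw [eq_comm]; exact pvDigitChar3 _ hlt
      rw [Nat.toDigits_of_base_le (by norm_num) (by omega), List.mem_append,
        List.mem_singleton, hstep, hmod, hdiv, ih (k / 10) (by omega), hchar]
      by_cases h3 : k % 10 = 3
      · simp [h3]
      · simp [h3]
        exact Or.inl (by omega)

-- the string test "3" in str(n) agrees with the arithmetic digit test (Int level, n ≥ 0)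
theorem pvIsIn_eq (n : Int) (hn : 0 ≤ n) :
    PySem.Str.isIn "3" (PySem.Int.toStr n) = !pvNo3 n := by
  have hsingleton : ∀ (l : List Char), ['3'] <:+: l ↔ '3' ∈ l := by
    intro l
    constructor
    · intro h; exact h.subset (List.mem_singleton_self _)
    · intro h
      obtain ⟨s, t, rfl⟩ := List.append_of_mem h
      exact ⟨s, t, by simp⟩
  have htl : PySem.Int.toChars n = Nat.toDigits 10 n.toNat := by
    rw [PySem.Int.toChars]
    simp [not_lt.mpr hn]
  have h3l : ("3" : String).toList = ['3'] := rfl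
  have hmem := pvMem_toDigits n.toNat
  rw [Int.toNat_of_nonneg hn] at hmem
  cases hno : pvNo3 n with
  | false =>
    have h1 : PySem.Chars.isIn ['3'] (Nat.toDigits 10 n.toNat) = true :=
      (PySem.Chars.isIn_iff_infix _ _).mpr ((hsingleton _).mpr (hmem.mpr hno))
    simp only [PySem.Str.isIn, PySem.Int.toList_toStr, h3l, htl, h1, Bool.not_false]
  | true =>
    have h1 : PySem.Chars.isIn ['3'] (Nat.toDigits 10 n.toNat) = false := by
      rw [Bool.eq_false_iff]
      intro hc
      have hm := (hsingleton _).mp ((PySem.Chars.isIn_iff_infix _ _).mp hc)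
      rw [hmem] at hm
      simp [hno] at hm
    simp only [PySem.Str.isIn, PySem.Int.toList_toStr, h3l, htl, h1, Bool.not_true]

theorem pvCountNo3_neg (m : Int) (h : m < 0) : pvCountNo3 m = 0 := by
  rw [pvCountNo3]; simp [h]

-- the digit-DP count satisfies the pointwise recurrence of the naive count
theorem pvCount_rec : ∀ k : Nat,
    pvCountNo3 (k : Int) = pvCountNo3 ((k : Int) - 1) + (if pvNo3 (k : Int) then 1 else 0) := by
  intro k
  induction k using Nat.strong_induction_on with
  | _ k ih =>
    rcases Nat.eq_zero_or_pos k with hk0 | hkpos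
    · subst hk0
      rw [pvCountNo3]
      norm_num [pvFd10, pvFm10, pvCountNo3_neg, pvNo3_zero]
    · have hk : (1 : Int) ≤ (k : Int) := by exact_mod_cast hkpos
      set N : Int := (k : Int) with hN
      have hstep := pvNo3_step N (by omega)
      by_cases hr : N % 10 = 0
      · -- last digit 0: N-1 ends in 9 and has quotient N/10 - 1
        have hq1 : 1 ≤ N / 10 := by omega
        have e1 : pvCountNo3 N =
            9 * pvCountNo3 (N / 10 - 1) + (if pvNo3 (N / 10) then 1 else 0) := by
          rw [pvCountNo3]
          simp only [dif_neg (by omega : ¬ N < 0), pvFd10, pvFm10, hr]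
          norm_num
        have e2 : pvCountNo3 (N - 1) =
            9 * pvCountNo3 ((N - 1) / 10 - 1) + (if pvNo3 ((N - 1) / 10) then 9 else 0) := by
          rw [pvCountNo3]
          have hm9 : (N - 1) % 10 = 9 := by omega
          simp only [dif_neg (by omega : ¬ N - 1 < 0), pvFd10, pvFm10, hm9]
          norm_num
        have hqq : (N - 1) / 10 = N / 10 - 1 := by omega
        -- IH at the quotient minus one
        have hql : (N / 10 - 1).toNat < k := by omega
        have hqc : (((N / 10 - 1).toNat : Int)) = N / 10 - 1 := by omega
        have ihq := ih (N / 10 - 1).toNat hql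
        rw [hqc] at ihq
        have hno : pvNo3 N = pvNo3 (N / 10) := by
          rw [hstep, hr]; simp
        rw [e1, e2, hqq, hno, ihq]
        split_ifs <;> omega
      · -- last digit ≥ 1: same quotient, last-digit count changes by [r ≠ 3]
        have e1 : pvCountNo3 N =
            9 * pvCountNo3 (N / 10 - 1) +
              (if pvNo3 (N / 10) then N % 10 + 1 - (if 3 ≤ N % 10 then 1 else 0) else 0) := by
          rw [pvCountNo3]
          simp only [dif_neg (by omega : ¬ N < 0), pvFd10, pvFm10]
        have hqq : (N - 1) / 10 = N / 10 := by omega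
        have hmm : (N - 1) % 10 = N % 10 - 1 := by omega
        have e2 : pvCountNo3 (N - 1) =
            9 * pvCountNo3 (N / 10 - 1) +
              (if pvNo3 (N / 10) then N % 10 - (if 3 ≤ N % 10 - 1 then 1 else 0) else 0) := by
          rw [pvCountNo3]
          simp only [dif_neg (by omega : ¬ N - 1 < 0), pvFd10, pvFm10, hqq, hmm]
          norm_num
        have hno : pvNo3 N = (!(N % 10 == 3) && pvNo3 (N / 10)) := hstep
        rw [e1, e2, hno]
        by_cases h3 : N % 10 = 3
        · simp only [h3]
          split_ifs <;> simp_all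
        · have : (N % 10 == 3) = false := by simp [h3]
          simp only [this, Bool.not_false, Bool.true_and]
          split_ifs <;> omega

theorem pvAlt_neg (N : Int) (h : N < 0) : solve_efficient_alt N = 0 := by
  simp [solve_efficient_alt, h]

-- B satisfies the same step recurrence as A's loop
theorem pvAlt_rec (N : Int) (hN : 0 ≤ N) :
    solve_efficient_alt N = solve_efficient_alt (N - 1) + (if pvNo3 N then 1575 else 3600) := by
  have hrec := pvCount_rec N.toNat
  rw [Int.toNat_of_nonneg hN] at hrec
  rcases Int.lt_or_le (N - 1) 0 with h1 | h1
  · have hN0 : N = 0 := by omega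
    subst hN0
    rw [pvAlt_neg (0 - 1 : Int) (by norm_num)]
    have hc : pvCountNo3 (0 : Int) = 1 := by
      rw [hrec, pvCountNo3_neg _ (by norm_num), pvNo3_zero]; norm_num
    simp [solve_efficient_alt, hc, pvNo3_zero]
  · simp only [solve_efficient_alt, if_neg (by omega : ¬ N < 0), if_neg (by omega : ¬ N - 1 < 0)]
    rw [hrec]
    split_ifs <;> ring

theorem pvA_neg (N : Int) (h : N < 0) : solve_efficient N = 0 := by
  simp [solve_efficient, PySem.List.pyRange_one_eq_nil (by omega : N + 1 ≤ 0)]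

-- A's loop grows by one step of the same recurrence
theorem pvA_rec (N : Int) (hN : 0 ≤ N) :
    solve_efficient N = solve_efficient (N - 1) + (if pvNo3 N then 1575 else 3600) := by
  simp only [solve_efficient]
  rw [PySem.List.pyRange_one_succ_right (by omega : (0 : Int) ≤ N)]
  rw [List.foldl_append]
  have : N - 1 + 1 = N := by ring
  rw [this]
  simp only [List.foldl_cons, List.foldl_nil]
  rw [pvIsIn_eq N hN]
  cases pvNo3 N <;> simp

theorem pvMain : ∀ k : Nat, solve_efficient (k : Int) = solve_efficient_alt (k : Int) := by
  intro k
  induction k with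
  | zero =>
    simp only [Nat.cast_zero]
    rw [pvA_rec 0 le_rfl, pvAlt_rec 0 le_rfl,
      pvA_neg _ (by norm_num), pvAlt_neg _ (by norm_num)]
  | succ n ihn =>
    have h : ((n + 1 : Nat) : Int) = (n : Int) + 1 := by push_cast; ring
    rw [h, pvA_rec _ (by positivity), pvAlt_rec _ (by positivity)]
    norm_num [ihn]

-- ===== VERDICT (by name: the statement is the Claim_ definition above) =====
theorem solve_efficient_spec : Claim_equal_solve_efficient := by
  intro N _
  unfold Spec_solve_efficient
  rcases Int.lt_or_le N 0 with h | h
  · rw [pvA_neg N h, pvAlt_neg N h]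
  · have := pvMain N.toNat
    rwa [Int.toNat_of_nonneg h] at this
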